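-- pv_equiv track=rewrite | github.com/electronicayciencia/rfid-rw | soft_pc/em4205.py | _word2data
-- ===== SOURCE A (Python) =====
-- def _word2data(w):
--     """
--     Convert a 32bit Word to Data Structure format
--
--     Input
--         32bit number
--     Output
--         45bit number
--     """
--
--     cp = 0  # even column parity byte
--     data = 0
--
--     for _ in range(4):
--         o = 0  # current octet in LSB first order
--         p = 0  # current even parity bit
--
--         for _ in range(8):
--             o <<= 1
--             o |= (w & 1)
--             p ^= (w & 1)
--             w >>= 1
--
--         cp ^= o
--         data <<= 9
--         data |= (o << 1 | p)
--
--     data <<= 9  # cp + stop bit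
--     data |= (cp << 1)
--
--     return data
-- ===== SOURCE B (Python) =====
-- def _rev8(b):
--     b = ((b & 0xF0) >> 4) | ((b & 0x0F) << 4)
--     b = ((b & 0xCC) >> 2) | ((b & 0x33) << 2)
--     b = ((b & 0xAA) >> 1) | ((b & 0x55) << 1)
--     return b
--
--
-- def _par8(b):
--     b ^= b >> 4
--     b ^= b >> 2
--     b ^= b >> 1
--     return b & 1
--
--
-- def _word2data(w):
--     """Byte-at-a-time: O(1) bit-swap reversal and parity per byte, no inner bit loop."""
--     w &= 0xFFFFFFFF
--     cp = 0
--     data = 0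
--     for i in range(4):
--         b = (w >> (8 * i)) & 0xFF
--         o = _rev8(b)
--         cp ^= o
--         data = (data << 9) | (o << 1 | _par8(b))
--     return (data << 9) | (cp << 1)
-- ===== Notes on version B (the rewrite author's own statement) =====
-- stated objective: alternative
-- what changed: Replaces the serial nested loop that destructively shifts w one bit at a time with a single byte-wise pass: each byte is indexed directly out of the masked word and its bit-reversal and parity are computed in constant time by bit-swap and xor-fold tricks, so the inner bit loop disappears.
import Mathlib
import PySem

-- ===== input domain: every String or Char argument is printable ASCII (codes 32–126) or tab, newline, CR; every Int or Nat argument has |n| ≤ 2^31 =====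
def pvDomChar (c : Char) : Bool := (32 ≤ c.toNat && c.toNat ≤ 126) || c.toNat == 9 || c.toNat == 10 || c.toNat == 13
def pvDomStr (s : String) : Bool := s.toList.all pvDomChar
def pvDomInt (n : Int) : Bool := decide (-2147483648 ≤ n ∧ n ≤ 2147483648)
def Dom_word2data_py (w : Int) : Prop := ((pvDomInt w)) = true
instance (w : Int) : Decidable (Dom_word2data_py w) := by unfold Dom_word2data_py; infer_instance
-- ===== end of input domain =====

-- B replaces A's serial per-bit loop with a byte-wise pass using constant-time bit-swap/xor-fold tricks; same return value on the whole domain.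

-- ===== PORT A =====
-- A's inner `for _ in range(8)` loop: state (o, p, w); o <<= 1; o |= w & 1; p ^= w & 1; w >>= 1
def pvInner (w : Int) : Int × Int × Int :=
  (List.range 8).foldl (fun t _ =>
    (PySem.Int.bor (t.1 <<< (1 : Nat)) (PySem.Int.band t.2.2 1),
     PySem.Int.bxor t.2.1 (PySem.Int.band t.2.2 1),
     t.2.2 >>> (1 : Nat))) (0, 0, w)

def word2data_py (w : Int) : Int :=
  let s := (List.range 4).foldl (fun s _ =>
    let t := pvInner s.2.2
    (PySem.Int.bxor s.1 t.1,
     PySem.Int.bor (s.2.1 <<< (9 : Nat)) (PySem.Int.bor (t.1 <<< (1 : Nat)) t.2.1),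
     t.2.2)) (0, 0, w)
  PySem.Int.bor (s.2.1 <<< (9 : Nat)) (s.1 <<< (1 : Nat))

-- ===== PORT B =====
def pvRev8 (b : Int) : Int :=
  let b1 := PySem.Int.bor ((PySem.Int.band b 0xF0) >>> (4 : Nat)) ((PySem.Int.band b 0x0F) <<< (4 : Nat))
  let b2 := PySem.Int.bor ((PySem.Int.band b1 0xCC) >>> (2 : Nat)) ((PySem.Int.band b1 0x33) <<< (2 : Nat))
  PySem.Int.bor ((PySem.Int.band b2 0xAA) >>> (1 : Nat)) ((PySem.Int.band b2 0x55) <<< (1 : Nat))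

def pvPar8 (b : Int) : Int :=
  let b1 := PySem.Int.bxor b (b >>> (4 : Nat))
  let b2 := PySem.Int.bxor b1 (b1 >>> (2 : Nat))
  let b3 := PySem.Int.bxor b2 (b2 >>> (1 : Nat))
  PySem.Int.band b3 1

def word2data_py_alt (w : Int) : Int :=
  let wm := PySem.Int.band w 0xFFFFFFFF
  let s := (List.range 4).foldl (fun (s : Int × Int) (i : Nat) =>
    let b := PySem.Int.band (wm >>> (8 * i)) 0xFF
    let o := pvRev8 b
    (PySem.Int.bxor s.1 o,
     PySem.Int.bor (s.2 <<< (9 : Nat)) (PySem.Int.bor (o <<< (1 : Nat)) (pvPar8 b)))) (0, 0)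
  PySem.Int.bor (s.2 <<< (9 : Nat)) (s.1 <<< (1 : Nat))

-- ===== PRECONDITION & SPEC =====
def Spec_word2data_py (w : Int) (out : Int) : Prop := out = word2data_py_alt w
instance (w : Int) (out : Int) : Decidable (Spec_word2data_py w out) := by unfold Spec_word2data_py; infer_instance

-- ===== CLAIM (what is proved, stated in full; the proofs are below) =====
def Claim_equal_word2data_py : Prop := ∀ (w : Int), Dom_word2data_py w → Spec_word2data_py w (word2data_py w)

-- ===== LEMMAS AND PROOFS =====
set_option maxHeartbeats 1000000 in
set_option maxRecDepth 10000 in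
lemma pv_byte_check : ∀ m : Nat, m < 256 → pvInner (m : Int) = (pvRev8 m, pvPar8 m, 0) := by decide

lemma pv_band1 (a : Int) : PySem.Int.band a 1 = a % 2 := by
  rw [PySem.Int.band_one, PySem.Int.mod_eq_emod_of_pos]; norm_num

lemma pv_range8 : List.range 8 = [0, 1, 2, 3, 4, 5, 6, 7] := rfl
lemma pv_range4 : List.range 4 = [0, 1, 2, 3] := rfl

lemma pvInner_third (w : Int) : (pvInner w).2.2 = w / 256 := by
  simp only [pvInner, pv_range8, List.foldl_cons, List.foldl_nil, Int.shiftRight_eq_div_pow]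
  norm_num
  omega

lemma pvInner_congr (w w' : Int) (h : w % 256 = w' % 256) :
    (pvInner w).1 = (pvInner w').1 ∧ (pvInner w).2.1 = (pvInner w').2.1 := by
  simp only [pvInner, pv_range8, List.foldl_cons, List.foldl_nil, pv_band1, Int.shiftRight_eq_div_pow]
  norm_num
  have e1 : w % 2 = w' % 2 := by omega
  have e2 : w / 2 % 2 = w' / 2 % 2 := by omega
  have e3 : w / 2 / 2 % 2 = w' / 2 / 2 % 2 := by omega
  have e4 : w / 2 / 2 / 2 % 2 = w' / 2 / 2 / 2 % 2 := by omega
  have e5 : w / 2 / 2 / 2 / 2 % 2 = w' / 2 / 2 / 2 / 2 % 2 := by omega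
  have e6 : w / 2 / 2 / 2 / 2 / 2 % 2 = w' / 2 / 2 / 2 / 2 / 2 % 2 := by omega
  have e7 : w / 2 / 2 / 2 / 2 / 2 / 2 % 2 = w' / 2 / 2 / 2 / 2 / 2 / 2 % 2 := by omega
  have e8 : w / 2 / 2 / 2 / 2 / 2 / 2 / 2 % 2 = w' / 2 / 2 / 2 / 2 / 2 / 2 / 2 % 2 := by omega
  rw [e1, e2, e3, e4, e5, e6, e7, e8]
  exact ⟨rfl, rfl⟩

lemma pvInner_eq (w : Int) : pvInner w = (pvRev8 (w % 256), pvPar8 (w % 256), w / 256) := by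
  obtain ⟨m, hm, hmeq⟩ : ∃ m : Nat, m < 256 ∧ w % 256 = (m : Int) :=
    ⟨(w % 256).toNat, by omega, by omega⟩
  obtain ⟨h1, h2⟩ := pvInner_congr w (m : Int) (by omega)
  have hb := pv_byte_check m hm
  rw [hmeq, Prod.ext_iff, Prod.ext_iff]
  refine ⟨?_, ?_, pvInner_third w⟩
  · rw [h1, hb]
  · rw [h2, hb]

-- Python's `x & 0xFFFFFFFF` on −2^31 ≤ x: the low 32 bits, i.e. x mod 2^32
lemma pv_band_mask32 (w : Int) (hw : -4294967296 ≤ w) :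
    PySem.Int.band w 4294967295 = w % 4294967296 := by
  unfold PySem.Int.band
  by_cases h : 0 ≤ w
  · rw [if_pos h, if_pos (by norm_num)]
    have ht : (4294967295 : Int).toNat = 4294967295 := rfl
    have h1 := Nat.and_two_pow_sub_one_eq_mod w.toNat 32
    norm_num at h1
    rw [ht, h1]; omega
  · rw [if_neg h, if_pos (by norm_num)]
    have ht : (4294967295 : Int).toNat = 4294967295 := rfl
    have h1 := Nat.and_two_pow_sub_one_eq_mod (-w - 1).toNat 32
    norm_num at h1
    rw [ht, Nat.and_comm, show (-w - 1).toNat = (-w).toNat - 1 by omega, h1]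
    omega

lemma pv_band255 (x : Int) (hx : 0 ≤ x) : PySem.Int.band x 255 = x % 256 := by
  rw [PySem.Int.band_of_nonneg hx (by norm_num)]
  have ht : (255 : Int).toNat = 255 := rfl
  have h1 := Nat.and_two_pow_sub_one_eq_mod x.toNat 8
  norm_num at h1
  rw [ht, h1]; omega

-- ===== VERDICT (by name: the statement is the Claim_ definition above) =====
theorem word2data_py_spec : Claim_equal_word2data_py := by
  intro w hdom
  have hw : -4294967296 ≤ w := by
    simp only [Dom_word2data_py, pvDomInt, decide_eq_true_eq] at hdom; omega
  show word2data_py w = word2data_py_alt w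
  have hm : PySem.Int.band w 4294967295 = w % 4294967296 := pv_band_mask32 w hw
  have hnn : 0 ≤ w % 4294967296 := Int.emod_nonneg w (by norm_num)
  have hb0 : PySem.Int.band (w % 4294967296) 255 = w % 256 := by
    rw [pv_band255 _ hnn]; omega
  have hb1 : PySem.Int.band ((w % 4294967296) / 256) 255 = w / 256 % 256 := by
    rw [pv_band255 _ (Int.ediv_nonneg hnn (by norm_num))]
    omega
  have hb2 : PySem.Int.band ((w % 4294967296) / 65536) 255 = w / 256 / 256 % 256 := by
    rw [pv_band255 _ (Int.ediv_nonneg hnn (by norm_num))]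
    omega
  have hb3 : PySem.Int.band ((w % 4294967296) / 16777216) 255 = w / 256 / 256 / 256 % 256 := by
    rw [pv_band255 _ (Int.ediv_nonneg hnn (by norm_num))]
    omega
  simp only [word2data_py, word2data_py_alt, pv_range4, List.foldl_cons, List.foldl_nil,
    pvInner_eq, hm, Int.shiftRight_eq_div_pow]
  norm_num
  simp only [hb0, hb1, hb2, hb3]
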